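-- pv_equiv track=rewrite | github.com/YuHuang0525/conflict-serializable-online-calc | graph.py | determineLoop
-- ===== SOURCE A (Python) =====
-- def determineLoop(path):
--     if len(path) == 1:
--         return 0
--     temp = set()
--     for x in path:
--         if x in temp:
--             return 1
--         else:
--             temp.add(x)
--     return 0
-- ===== SOURCE B (Python) =====
-- def determineLoop(path):
--     s = sorted(path)
--     return int(any(a == b for a, b in zip(s, s[1:])))
-- ===== Notes on version B (the rewrite author's own statement) =====
-- stated objective: alternative
-- what changed: Replaced the hash-set early-exit scan (with a special len==1 branch) by sort-then-adjacent-scan: sort the path and report 1 iff some adjacent pair of the sorted list is equal.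
import Mathlib
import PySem

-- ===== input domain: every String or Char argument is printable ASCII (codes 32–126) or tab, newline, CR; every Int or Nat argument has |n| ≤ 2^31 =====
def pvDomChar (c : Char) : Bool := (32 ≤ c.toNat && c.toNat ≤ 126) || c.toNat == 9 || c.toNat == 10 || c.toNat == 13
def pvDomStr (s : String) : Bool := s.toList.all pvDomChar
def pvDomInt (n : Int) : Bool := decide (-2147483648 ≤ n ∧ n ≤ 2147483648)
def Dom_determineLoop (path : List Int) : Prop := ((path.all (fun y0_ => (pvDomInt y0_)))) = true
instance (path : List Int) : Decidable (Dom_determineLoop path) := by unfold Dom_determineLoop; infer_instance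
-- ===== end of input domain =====

-- B sorts the path and reports 1 iff some adjacent pair of the sorted list is equal, instead of A's seen-set early-exit scan; objective: alternative.


-- ===== PORT A =====
-- helper: the seen-set loop (early exit encoded by returning 1)
def detLoopA : List Int → PySem.Set Int → Int
  | [], _ => 0
  | x :: xs, temp =>
      if x ∈ temp then 1
      else detLoopA xs (PySem.Set.add temp x)

def determineLoop (path : List Int) : Int :=
  if path.length = 1 then 0
  else detLoopA path PySem.Set.empty

-- ===== PORT B =====
def determineLoop_alt (path : List Int) : Int :=
  let s := PySem.List.sorted path (fun x => x) false
  if (s.zip (PySem.List.slice s (some 1) none)).any (fun p => p.1 == p.2) then 1 else 0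

-- ===== PRECONDITION & SPEC =====
def Spec_determineLoop (path : List Int) (out : Int) : Prop := out = determineLoop_alt path
instance (path : List Int) (out : Int) : Decidable (Spec_determineLoop path out) := by unfold Spec_determineLoop; infer_instance

-- ===== CLAIM (what is proved, stated in full; the proofs are below) =====
def Claim_equal_determineLoop : Prop := ∀ (path : List Int), Dom_determineLoop path → Spec_determineLoop path (determineLoop path)

-- ===== LEMMAS AND PROOFS =====
lemma set_add_of_not_mem (s : PySem.Set Int) (x : Int) (h : x ∉ s) :
    PySem.Set.add s x = s ++ [x] := by simp [PySem.Set.add, h]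

-- A's loop over a duplicate-free seen list decides Nodup of seen ++ rest
lemma detLoopA_eq (l : List Int) (s : PySem.Set Int) (hs : s.Nodup) :
    detLoopA l s = if (s ++ l).Nodup then 0 else 1 := by
  induction l generalizing s with
  | nil => simp [detLoopA, hs]
  | cons x xs ih =>
      simp only [detLoopA]
      by_cases hm : x ∈ s
      · rw [if_pos hm, if_neg]
        intro hn
        simp only [List.nodup_append] at hn
        exact hn.2.2 x hm x (List.mem_cons_self ..) rfl
      · have hs' : (s ++ [x]).Nodup := by
          rw [List.nodup_append]
          refine ⟨hs, by simp, ?_⟩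
          intro a ha b hb
          simp only [List.mem_singleton] at hb
          subst hb
          exact fun h => hm (h ▸ ha)
        rw [if_neg hm, set_add_of_not_mem s x hm, ih _ hs', List.append_assoc]
        rfl

-- on a ≤-sorted list, an equal adjacent pair exists iff the list has a duplicate
lemma adj_eq_iff (l : List Int) (h : l.Pairwise (· ≤ ·)) :
    ((l.zip l.tail).any (fun p => p.1 == p.2) = true) ↔ ¬ l.Nodup := by
  induction l with
  | nil => simp
  | cons x t ih =>
      cases t with
      | nil => simp
      | cons y r =>
          have hxy : x ≤ y := (List.pairwise_cons.mp h).1 y (by simp)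
          have ht : (y :: r).Pairwise (· ≤ ·) := (List.pairwise_cons.mp h).2
          by_cases hxe : x = y
          · subst hxe
            constructor
            · intro _ hn
              exact (List.nodup_cons.mp hn).1 (by simp)
            · intro _; simp
          · have hlt : x < y := lt_of_le_of_ne hxy hxe
            have hnotmem : x ∉ y :: r := by
              intro hm
              rcases List.mem_cons.mp hm with h1 | h2
              · exact hxe h1
              · have hyz : y ≤ x := (List.pairwise_cons.mp ht).1 x h2
                omega
            have hzip : ((x :: y :: r).zip (x :: y :: r).tail).any (fun p => p.1 == p.2)
                = (((y :: r).zip (y :: r).tail).any (fun p => p.1 == p.2)) := by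
              simp [hxe]
            rw [hzip, ih ht]
            constructor
            · intro hnd hn
              exact hnd (List.nodup_cons.mp hn).2
            · intro hnd hn
              exact hnd (List.nodup_cons.mpr ⟨hnotmem, hn⟩)

theorem determineLoop_spec : Claim_equal_determineLoop := by
  intro path _
  unfold Spec_determineLoop determineLoop determineLoop_alt
  have hperm : (PySem.List.sorted path (fun x => x) false).Perm path :=
    PySem.List.sorted_perm path (fun x => x) false
  have hpw : (PySem.List.sorted path (fun x => x) false).Pairwise (· ≤ ·) := by
    have := PySem.List.sorted_pairwise path (fun x => x)
    simpa using this
  have hslice : PySem.List.slice (PySem.List.sorted path (fun x => x) false) (some 1) none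
      = (PySem.List.sorted path (fun x => x) false).tail :=
    PySem.List.slice_from_one _
  dsimp only
  rw [hslice]
  have hadj := adj_eq_iff _ hpw
  have hnd : (PySem.List.sorted path (fun x => x) false).Nodup ↔ path.Nodup :=
    hperm.nodup_iff
  by_cases h1 : path.length = 1
  · rw [if_pos h1]
    have hn : path.Nodup := by
      match path, h1 with
      | [a], _ => simp
    rw [if_neg]
    rw [hadj, hnd]
    exact fun hc => hc hn
  · rw [if_neg h1, detLoopA_eq _ _ (by simp [PySem.Set.empty])]
    simp only [PySem.Set.empty, List.nil_append]
    by_cases hn : path.Nodup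
    · rw [if_pos hn, if_neg]
      rw [hadj, hnd]
      exact fun hc => hc hn
    · rw [if_neg hn, if_pos]
      rw [hadj, hnd]
      exact hn
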